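-- pv_equiv track=rewrite | github.com/DHS-TransformationFramework/esa_tf | esa_tf_restapi/tests/client_test_routes.py | get_transformation_orders
-- ===== SOURCE A (Python) =====
-- import typing as T
--
-- def get_transformation_orders(
--     filters: T.List[T.Tuple[str, str, str]] = [], uri_root=None, **kwargs
-- ):
--     entries = [
--         {"Id": "foo", "Status": "in_progress"},
--         {"Id": "bar", "Status": "completed"},
--     ]
--     for filter in filters:
--         name, _op, value = filter
--         if name == "Status":
--             entries = [e for e in entries if e[name] == value]
--     return entries
-- ===== SOURCE B (Python) =====
-- import typing as T
--
-- def get_transformation_orders(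
--     filters: T.List[T.Tuple[str, str, str]] = [], uri_root=None, **kwargs
-- ):
--     def keep(status):
--         for name, _op, value in filters:
--             if name == "Status" and value != status:
--                 return False
--         return True
--
--     result = []
--     if keep("in_progress"):
--         result.append({"Id": "foo", "Status": "in_progress"})
--     if keep("completed"):
--         result.append({"Id": "bar", "Status": "completed"})
--     return result
-- ===== Notes on version B (the rewrite author's own statement) =====
-- stated objective: alternative
-- what changed: B inverts the traversal: instead of repeatedly rebuilding the entry list per Status filter, it decides per fixed entry (by status) with an early-exit scan of the filters whether any Status filter excludes it, and assembles the result directly.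
import Mathlib
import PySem

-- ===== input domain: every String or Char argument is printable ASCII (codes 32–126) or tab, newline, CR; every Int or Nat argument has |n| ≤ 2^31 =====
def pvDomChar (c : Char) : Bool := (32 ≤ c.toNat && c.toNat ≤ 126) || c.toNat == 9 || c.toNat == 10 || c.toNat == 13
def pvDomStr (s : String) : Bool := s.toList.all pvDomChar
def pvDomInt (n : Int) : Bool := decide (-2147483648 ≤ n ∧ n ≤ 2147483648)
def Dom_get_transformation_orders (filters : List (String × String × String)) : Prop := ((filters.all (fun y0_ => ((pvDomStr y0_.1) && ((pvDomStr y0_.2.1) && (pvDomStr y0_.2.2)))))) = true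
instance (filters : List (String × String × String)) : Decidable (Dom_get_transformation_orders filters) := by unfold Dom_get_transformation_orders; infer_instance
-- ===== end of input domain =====

-- ===== PORT A =====
-- B inverts the traversal: it decides per fixed entry whether any Status filter excludes it (objective: alternative).
def pvEntries : List (List (String × String)) :=
  [[("Id", "foo"), ("Status", "in_progress")], [("Id", "bar"), ("Status", "completed")]]

-- e[name] : key lookup; keys are always present on the fixed entries, so getD never uses its default.
def get_transformation_orders (filters : List (String × String × String)) : List (List (String × String)) :=
  filters.foldl
    (fun entries f =>
      if f.1 == "Status" then
        entries.filter (fun e => PySem.Dict.getD (PySem.Dict.mk e) f.1 "" == f.2.2)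
      else entries)
    pvEntries

-- ===== PORT B =====
-- inner helper `keep`: early-exit scan of the filters, as recursion
def pvKeep (filters : List (String × String × String)) (status : String) : Bool :=
  match filters with
  | [] => true
  | f :: fs => if f.1 == "Status" && f.2.2 != status then false else pvKeep fs status

def get_transformation_orders_alt (filters : List (String × String × String)) : List (List (String × String)) :=
  (if pvKeep filters "in_progress" then [[("Id", "foo"), ("Status", "in_progress")]] else [])
    ++ (if pvKeep filters "completed" then [[("Id", "bar"), ("Status", "completed")]] else [])

-- ===== PRECONDITION & SPEC =====
def Spec_get_transformation_orders (filters : List (String × String × String)) (out : List (List (String × String))) : Prop := out = get_transformation_orders_alt filters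
instance (filters : List (String × String × String)) (out : List (List (String × String))) : Decidable (Spec_get_transformation_orders filters out) := by unfold Spec_get_transformation_orders; infer_instance

-- ===== CLAIM (what is proved, stated in full; the proofs are below) =====
def Claim_equal_get_transformation_orders : Prop := ∀ (filters : List (String × String × String)), Dom_get_transformation_orders filters → Spec_get_transformation_orders filters (get_transformation_orders filters)

-- ===== LEMMAS AND PROOFS =====

def pvReq (filters : List (String × String × String)) : List String :=
  filters.filterMap (fun f => if f.1 == "Status" then some f.2.2 else none)

theorem pvReq_cons (f : String × String × String) (fs : List (String × String × String)) :
    pvReq (f :: fs) = (if (f.1 == "Status") = true then [f.2.2] else []) ++ pvReq fs := by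
  simp only [pvReq, List.filterMap_cons]
  by_cases h : (f.1 == "Status") = true <;> simp [h]

-- A's fold over the filters equals a single filter of the fixed entries by all required statuses.
theorem pvFoldA (filters : List (String × String × String)) (es : List (List (String × String))) :
    filters.foldl
      (fun entries f =>
        if f.1 == "Status" then
          entries.filter (fun e => PySem.Dict.getD (PySem.Dict.mk e) f.1 "" == f.2.2)
        else entries) es
      = es.filter (fun e => (pvReq filters).all
          (fun v => PySem.Dict.getD (PySem.Dict.mk e) "Status" "" == v)) := by
  induction filters generalizing es with
  | nil => simp [pvReq]
  | cons f fs ih =>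
    rw [List.foldl_cons, pvReq_cons]
    by_cases h : (f.1 == "Status") = true
    · have hn : f.1 = "Status" := by simpa using h
      rw [if_pos h, if_pos h, ih, List.filter_filter]
      congr 1; funext e
      simp [hn, Bool.and_comm]
    · rw [if_neg h, if_neg h, ih]; simp

-- B's early-exit keep equals "every required status value equals this status".
theorem pvKeep_all (filters : List (String × String × String)) (s : String) :
    pvKeep filters s = (pvReq filters).all (fun v => s == v) := by
  induction filters with
  | nil => simp [pvKeep, pvReq]
  | cons f fs ih =>
    rw [pvKeep, pvReq_cons]
    by_cases h : (f.1 == "Status") = true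
    · by_cases hv : f.2.2 = s
      · simp [h, hv, ih]
      · have h1 : (f.2.2 != s) = true := by simp [hv]
        have h2 : (s == f.2.2) = false := by simp [Ne.symm hv]
        simp [h, h1, h2]
    · simp [h, ih]

-- ===== VERDICT (by name: the statement is the Claim_ definition above) =====
theorem get_transformation_orders_spec : Claim_equal_get_transformation_orders := by
  intro filters _
  unfold Spec_get_transformation_orders get_transformation_orders get_transformation_orders_alt
  rw [pvFoldA]
  have g1 : PySem.Dict.getD (PySem.Dict.mk [("Id", "foo"), ("Status", "in_progress")]) "Status" "" = "in_progress" := rfl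
  have g2 : PySem.Dict.getD (PySem.Dict.mk [("Id", "bar"), ("Status", "completed")]) "Status" "" = "completed" := rfl
  simp only [pvEntries, List.filter_cons, List.filter_nil, pvKeep_all, g1, g2]
  by_cases h1 : ((pvReq filters).all (fun v => "in_progress" == v)) = true <;>
    by_cases h2 : ((pvReq filters).all (fun v => "completed" == v)) = true <;>
      simp [h1, h2]
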